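-- pv_equiv track=rewrite | github.com/dragneel786/leetcode_practise | 3754-concatenate-non-zero-digits-and-multiply-by-sum-i/3754-concatenate-non-zero-digits-and-multiply-by-sum-i.py | sumAndMultiply
-- ===== SOURCE A (Python) =====
-- def sumAndMultiply(n: int) -> int:
--     mul = tot = 0
--     pows = 1
--     while(n):
--         rem = n % 10
--         if rem != 0:
--             mul = (pows * rem) + mul
--             tot += rem
--             pows *= 10
--         n //= 10
--
--     return tot * mul
-- ===== SOURCE B (Python) =====
-- def sumAndMultiply(n: int) -> int:
--     digits = [c for c in str(n) if c != '0']
--     total = sum(int(c) for c in digits)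
--     concat = int(''.join(digits)) if digits else 0
--     return total * concat
-- ===== Notes on version B (the rewrite author's own statement) =====
-- stated objective: idiomatic
-- what changed: B filters the decimal string of n once, obtains the multiplier by joining the remaining digit characters and parsing them with int() (defaulting to 0 when none remain) and the total by summing int(c) over them, replacing A's %-and-// while loop that rebuilds the number digit by digit with a power-of-ten accumulator.
import Mathlib
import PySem

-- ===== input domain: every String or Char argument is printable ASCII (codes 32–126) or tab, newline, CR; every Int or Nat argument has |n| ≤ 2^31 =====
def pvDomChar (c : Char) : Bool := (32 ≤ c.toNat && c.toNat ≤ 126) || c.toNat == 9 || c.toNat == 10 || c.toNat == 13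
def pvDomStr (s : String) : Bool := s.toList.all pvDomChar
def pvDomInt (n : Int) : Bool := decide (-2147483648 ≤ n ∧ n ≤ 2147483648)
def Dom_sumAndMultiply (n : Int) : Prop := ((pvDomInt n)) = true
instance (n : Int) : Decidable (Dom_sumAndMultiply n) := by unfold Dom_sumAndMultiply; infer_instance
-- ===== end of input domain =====

-- B filters the decimal string of n once, gets the multiplier by parsing the joined non-zero
-- digit characters with int() (0 when none remain) and the total by summing int(c); same cost,
-- more idiomatic than A's %-and-// while loop with its power-of-ten accumulator.


-- ===== PORT A =====
-- A's while-loop. Python's loop never terminates for n < 0 (n //= 10 stalls at -1);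
-- those inputs are outside Pre_, and the guard 0 < n only makes the port total there.
def pvLoopA (n mul tot pows : Int) : Int × Int :=
  if _h : 0 < n then
    let rem := PySem.Int.mod n 10
    if rem ≠ 0 then
      pvLoopA (PySem.Int.floordiv n 10) (pows * rem + mul) (tot + rem) (pows * 10)
    else
      pvLoopA (PySem.Int.floordiv n 10) mul tot pows
  else (mul, tot)
termination_by n.toNat
decreasing_by
  all_goals
    rw [PySem.Int.floordiv_eq_ediv_of_pos (by norm_num)]
    omega

def sumAndMultiply (n : Int) : Int :=
  let r := pvLoopA n 0 0 1
  r.2 * r.1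

-- ===== PORT B =====
-- int() is hand-ported here: pvParseDigits is exact for int(s) when s is a nonempty string of
-- decimal digits, which are the only strings B passes to int(''.join(...)); likewise int(c) for a
-- single digit character c is exactly c.toNat - 48.
def pvParseDigits (cs : List Char) : Int :=
  cs.foldl (fun a c => a * 10 + ((c.toNat : Int) - 48)) 0

def sumAndMultiply_alt (n : Int) : Int :=
  let digits := (PySem.Int.toStr n).toList.filter (fun c => c ≠ '0')
  let total := (digits.map (fun c => ((c.toNat : Int) - 48))).sum
  let concat := if digits.isEmpty then 0 else pvParseDigits digits
  total * concat

-- ===== PRECONDITION & SPEC =====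
-- Pre_ excludes n < 0, where Python's A loops forever (never returns).
def Pre_sumAndMultiply (n : Int) : Prop := 0 ≤ n
instance (n : Int) : Decidable (Pre_sumAndMultiply n) := by unfold Pre_sumAndMultiply; infer_instance
def pvWitness_sumAndMultiply : Int := 1203

def Spec_sumAndMultiply (n : Int) (out : Int) : Prop := out = sumAndMultiply_alt n
instance (n : Int) (out : Int) : Decidable (Spec_sumAndMultiply n out) := by unfold Spec_sumAndMultiply; infer_instance

-- ===== CLAIM =====
def Claim_equal_sumAndMultiply : Prop := ∀ (n : Int), Dom_sumAndMultiply n → Pre_sumAndMultiply n → Spec_sumAndMultiply n (sumAndMultiply n)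

-- ===== LEMMAS AND PROOFS =====

-- the non-zero digits of m, least significant first
def pvNZ (m : Nat) : List Nat := (Nat.digits 10 m).filter (· ≠ 0)

lemma pvLoopA_spec (m : Nat) : ∀ (mul tot pows : Int),
    pvLoopA (m : Int) mul tot pows =
      (mul + pows * (Nat.ofDigits 10 (pvNZ m) : ℕ), tot + ((pvNZ m).sum : ℕ)) := by
  induction m using Nat.strong_induction_on with
  | _ m ih =>
    intro mul tot pows
    rw [pvLoopA]
    rcases Nat.eq_zero_or_pos m with hm | hm
    · subst hm; simp [pvNZ]
    · have hlt : (0 : Int) < (m : Int) := by exact_mod_cast hm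
      have hdig : Nat.digits 10 m = m % 10 :: Nat.digits 10 (m / 10) :=
        Nat.digits_def' (by norm_num) hm
      have hrec := ih (m / 10) (Nat.div_lt_self hm (by norm_num))
      have hmod : PySem.Int.mod (m : Int) 10 = ((m % 10 : Nat) : Int) := by
        rw [PySem.Int.mod_eq_emod_of_pos (by norm_num)]; norm_cast
      have hdiv : PySem.Int.floordiv (m : Int) 10 = ((m / 10 : Nat) : Int) := by
        rw [PySem.Int.floordiv_eq_ediv_of_pos (by norm_num)]; norm_cast
      rw [dif_pos hlt, hmod, hdiv]
      by_cases h0 : m % 10 = 0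
      · have hz : ((m % 10 : Nat) : Int) = 0 := by simp [h0]
        rw [if_neg (by simp [hz]), hrec]
        simp [pvNZ, hdig, h0]
      · rw [if_pos (by exact_mod_cast h0), hrec]
        have hnz : pvNZ m = m % 10 :: pvNZ (m / 10) := by
          simp [pvNZ, hdig, h0]
        rw [hnz]
        simp [Nat.ofDigits_cons]
        constructor <;> push_cast <;> ring

lemma pvDigitChar_ne_zero (d : Nat) (h : d < 10) : (Nat.digitChar d ≠ '0') ↔ d ≠ 0 := by
  interval_cases d <;> decide

lemma pvDigitChar_toNat (d : Nat) (h : d < 10) : (Nat.digitChar d).toNat = d + 48 := by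
  interval_cases d <;> decide

-- the non-zero chars of the printed digits are the printed non-zero digits
lemma pvFilterChars (bs : List Nat) (h : ∀ d ∈ bs, d < 10) :
    ((bs.map Nat.digitChar).reverse).filter (fun c => c ≠ '0') =
      ((bs.filter (· ≠ 0)).map Nat.digitChar).reverse := by
  rw [List.filter_reverse, List.filter_map]
  have hc : bs.filter ((fun c => decide (c ≠ '0')) ∘ Nat.digitChar) = bs.filter (fun x => decide (x ≠ 0)) := by
    apply List.filter_congr
    intro d hd
    simpa using not_iff_not.mp (pvDigitChar_ne_zero d (h d hd))
  rw [hc]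

-- the char-sum pass computes the digit sum
lemma pvSum_spec (bs : List Nat) (h : ∀ d ∈ bs, d < 10) :
    (((bs.map Nat.digitChar).reverse).map (fun c => ((c.toNat : Int) - 48))).sum
      = (bs.sum : ℕ) := by
  induction bs with
  | nil => simp
  | cons d rest ih =>
    have hd : d < 10 := h d (by simp)
    have hrest : ∀ x ∈ rest, x < 10 := fun x hx => h x (by simp [hx])
    simp only [List.map_cons, List.reverse_cons, List.map_append, List.sum_append,
      List.map_cons, List.map_nil, List.sum_cons, List.sum_nil, ih hrest,
      pvDigitChar_toNat d hd]
    push_cast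
    ring

-- Horner parse of the printed digits (most significant first) is ofDigits
lemma pvParse_go (bs : List Nat) (h : ∀ d ∈ bs, d < 10) : ∀ (acc : Int),
    ((bs.map Nat.digitChar).reverse).foldl (fun a c => a * 10 + ((c.toNat : Int) - 48)) acc
      = acc * 10 ^ bs.length + (Nat.ofDigits 10 bs : ℕ) := by
  induction bs with
  | nil => simp
  | cons d rest ih =>
    intro acc
    have hd : d < 10 := h d (by simp)
    have hrest : ∀ x ∈ rest, x < 10 := fun x hx => h x (by simp [hx])
    simp only [List.map_cons, List.reverse_cons, List.foldl_append, List.foldl_cons,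
      List.foldl_nil, ih hrest acc, pvDigitChar_toNat d hd, Nat.ofDigits_cons,
      List.length_cons]
    push_cast
    ring

lemma pvParse_spec (bs : List Nat) (h : ∀ d ∈ bs, d < 10) :
    pvParseDigits ((bs.map Nat.digitChar).reverse) = (Nat.ofDigits 10 bs : ℕ) := by
  unfold pvParseDigits
  rw [pvParse_go bs h 0]
  simp

lemma pvToDigitsCore (f : Nat) : ∀ (n : Nat) (l : List Char), 0 < n → n < f →
    Nat.toDigitsCore 10 f n l = ((Nat.digits 10 n).map Nat.digitChar).reverse ++ l := by
  induction f with
  | zero => intro n l hn hf; omega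
  | succ f ih =>
    intro n l hn hf
    have hdig : Nat.digits 10 n = n % 10 :: Nat.digits 10 (n / 10) :=
      Nat.digits_def' (by norm_num) hn
    rw [Nat.toDigitsCore]
    by_cases hq : n / 10 = 0
    · have : n % 10 = n := Nat.mod_eq_of_lt (by omega)
      simp [hq, hdig, this]
    · have hlt2 : n / 10 < f := by
        have h2 := Nat.div_lt_self hn (by norm_num : 1 < 10)
        omega
      rw [if_neg hq, ih (n / 10) _ (Nat.pos_of_ne_zero hq) hlt2]
      simp [hdig]

lemma pvToDigits (n : Nat) (hn : 0 < n) :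
    Nat.toDigits 10 n = ((Nat.digits 10 n).map Nat.digitChar).reverse := by
  have := pvToDigitsCore (n + 1) n [] hn (by omega)
  simpa [Nat.toDigits] using this

-- ===== VERDICT (by name: the statement is the Claim_ definition above) =====
theorem sumAndMultiply_spec : Claim_equal_sumAndMultiply := by
  intro n _ hpre
  unfold Spec_sumAndMultiply
  obtain ⟨m, rfl⟩ : ∃ m : Nat, n = (m : Int) := ⟨n.toNat, (Int.toNat_of_nonneg hpre).symm⟩
  have hA : sumAndMultiply (m : Int) =
      ((pvNZ m).sum : ℕ) * (Nat.ofDigits 10 (pvNZ m) : ℕ) := by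
    simp [sumAndMultiply, pvLoopA_spec m 0 0 1]
  rcases Nat.eq_zero_or_pos m with hm | hm
  · subst hm
    have hB : sumAndMultiply_alt ((0 : Nat) : Int) = 0 := by decide
    simp only [Nat.cast_zero] at hA hB ⊢
    rw [hB, hA]
    simp [pvNZ]
  · have hchars : (PySem.Int.toStr (m : Int)).toList =
        ((Nat.digits 10 m).map Nat.digitChar).reverse := by
      rw [PySem.Int.toList_toStr]
      have hneg : ¬ ((m : Int) < 0) := by omega
      simp only [PySem.Int.toChars, if_neg hneg, Int.toNat_natCast]
      exact pvToDigits m hm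
    have hlt : ∀ d ∈ Nat.digits 10 m, d < 10 :=
      fun d hd => Nat.digits_lt_base (by norm_num) hd
    have hltnz : ∀ d ∈ pvNZ m, d < 10 := by
      intro d hd
      exact hlt d (List.mem_of_mem_filter hd)
    have hfil : ((PySem.Int.toStr (m : Int)).toList).filter (fun c => c ≠ '0') =
        ((pvNZ m).map Nat.digitChar).reverse := by
      rw [hchars, pvFilterChars _ hlt]; rfl
    have hB : sumAndMultiply_alt (m : Int) =
        ((pvNZ m).sum : ℕ) * (Nat.ofDigits 10 (pvNZ m) : ℕ) := by
      unfold sumAndMultiply_alt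
      rw [hfil]
      show ((((pvNZ m).map Nat.digitChar).reverse).map (fun c => ((c.toNat : Int) - 48))).sum *
          (if (((pvNZ m).map Nat.digitChar).reverse).isEmpty then 0
           else pvParseDigits (((pvNZ m).map Nat.digitChar).reverse)) =
          ((pvNZ m).sum : ℕ) * (Nat.ofDigits 10 (pvNZ m) : ℕ)
      rw [pvSum_spec _ hltnz]
      by_cases hemp : pvNZ m = []
      · simp [hemp]
      · rw [if_neg (by simp [hemp]), pvParse_spec _ hltnz]
    rw [hA, hB]
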